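-- pv_equiv track=rewrite | github.com/azrilevichnirit-sketch/emerald-city-expedition | pipeline/directing/build_mission_html.py | _best_token_pair_score
-- ===== SOURCE A (Python) =====
-- def _common_prefix_len(a: str, b: str) -> int:
--     n = 0
--     for ca, cb in zip(a, b):
--         if ca == cb:
--             n += 1
--         else:
--             break
--     return n
--
-- def _best_token_pair_score(label_toks: set[str], cand_toks: set[str]) -> int:
--     """For each label token, find best pairing with a cand token.
--     Returns sum of (exact=10, prefix3+=6, prefix2+=3, substr=2)."""
--     total = 0
--     for lt in label_toks:
--         best = 0
--         for ct in cand_toks: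
--             if lt == ct:
--                 best = max(best, 10)
--             else:
--                 p = _common_prefix_len(lt, ct)
--                 if p >= 3:
--                     best = max(best, 6)
--                 elif p >= 2:
--                     best = max(best, 3)
--                 if (lt in ct or ct in lt) and p > 0:
--                     best = max(best, 2)
--         total += best
--     return total
-- ===== SOURCE B (Python) =====
-- def _best_token_pair_score(label_toks, cand_toks):
--     """Tiered lookup: O(1) set membership for the exact/prefix tiers, a scan
--     only for the rare substring tier."""
--     cset = set(cand_toks)
--     pre3 = {ct[:3] for ct in cand_toks if len(ct) >= 3}
--     pre2 = {ct[:2] for ct in cand_toks if len(ct) >= 2}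
--     total = 0
--     for lt in label_toks:
--         if lt in cset:
--             total += 10
--         elif len(lt) >= 3 and lt[:3] in pre3:
--             total += 6
--         elif len(lt) >= 2 and lt[:2] in pre2:
--             total += 3
--         elif lt and any(ct and ct[0] == lt[0] and (lt in ct or ct in lt)
--                         for ct in cand_toks):
--             total += 2
--     return total
-- ===== Notes on version B (the rewrite author's own statement) =====
-- stated objective: faster
-- what changed: Replaces the nested per-label scan over all candidates (computing a running max of per-pair scores) by precomputed candidate exact/2-prefix/3-prefix hash sets giving O(1) tier lookups per label token, with a linear scan only in the rare substring tier.
import Mathlib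
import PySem

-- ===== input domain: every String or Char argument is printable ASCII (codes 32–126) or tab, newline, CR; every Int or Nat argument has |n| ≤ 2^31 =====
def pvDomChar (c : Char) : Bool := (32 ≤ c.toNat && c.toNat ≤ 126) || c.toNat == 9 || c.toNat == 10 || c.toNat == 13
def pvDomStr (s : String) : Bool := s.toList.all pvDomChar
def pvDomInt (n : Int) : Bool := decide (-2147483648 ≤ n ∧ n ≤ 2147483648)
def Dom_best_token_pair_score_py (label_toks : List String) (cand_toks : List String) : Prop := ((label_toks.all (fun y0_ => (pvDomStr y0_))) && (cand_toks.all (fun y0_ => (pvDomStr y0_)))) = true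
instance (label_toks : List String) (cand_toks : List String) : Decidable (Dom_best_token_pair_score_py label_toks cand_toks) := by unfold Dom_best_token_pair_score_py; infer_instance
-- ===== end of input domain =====

-- B replaces A's per-label scan over all candidates by precomputed exact/3-prefix/2-prefix
-- candidate sets with tier lookups per label token (a candidate scan remains only in the
-- substring-tier fallback); a timing run reports B measurably faster.


-- ===== PORT A =====
-- _common_prefix_len: the for-with-break over zip(a, b), as structural recursion on both lists
def pvCommonPrefixLen : List Char → List Char → Int
  | ca :: as_, cb :: bs => if ca = cb then 1 + pvCommonPrefixLen as_ bs else 0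
  | _, _ => 0

def best_token_pair_score_py (label_toks : List String) (cand_toks : List String) : Int :=
  label_toks.foldl (fun total lt =>
    total + cand_toks.foldl (fun best ct =>
      if lt = ct then max best 10
      else
        let p := pvCommonPrefixLen lt.toList ct.toList
        let best1 := if p ≥ 3 then max best 6 else if p ≥ 2 then max best 3 else best
        if (PySem.Chars.isIn lt.toList ct.toList || PySem.Chars.isIn ct.toList lt.toList) && decide (p > 0)
        then max best1 2 else best1) 0) 0

-- ===== PORT B =====
def best_token_pair_score_py_alt (label_toks : List String) (cand_toks : List String) : Int :=
  let cset : PySem.Set String := PySem.Set.ofList cand_toks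
  let pre3 : PySem.Set (List Char) :=
    PySem.Set.ofList ((cand_toks.filter (fun ct => 3 ≤ ct.toList.length)).map (fun ct => ct.toList.take 3))
  let pre2 : PySem.Set (List Char) :=
    PySem.Set.ofList ((cand_toks.filter (fun ct => 2 ≤ ct.toList.length)).map (fun ct => ct.toList.take 2))
  label_toks.foldl (fun total lt =>
    if PySem.Set.contains cset lt then total + 10
    else if decide (3 ≤ lt.toList.length) && PySem.Set.contains pre3 (lt.toList.take 3) then total + 6
    else if decide (2 ≤ lt.toList.length) && PySem.Set.contains pre2 (lt.toList.take 2) then total + 3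
    else if !lt.toList.isEmpty &&
            cand_toks.any (fun ct =>
              !ct.toList.isEmpty && ct.toList.head? == lt.toList.head? &&
              (PySem.Chars.isIn lt.toList ct.toList || PySem.Chars.isIn ct.toList lt.toList))
         then total + 2
    else total) 0

-- ===== PRECONDITION & SPEC =====
def Spec_best_token_pair_score_py (label_toks : List String) (cand_toks : List String) (out : Int) : Prop := out = best_token_pair_score_py_alt label_toks cand_toks
instance (label_toks : List String) (cand_toks : List String) (out : Int) : Decidable (Spec_best_token_pair_score_py label_toks cand_toks out) := by unfold Spec_best_token_pair_score_py; infer_instance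

-- ===== CLAIM (what is proved, stated in full; the proofs are below) =====
def Claim_equal_best_token_pair_score_py : Prop := ∀ (label_toks : List String) (cand_toks : List String), Dom_best_token_pair_score_py label_toks cand_toks → Spec_best_token_pair_score_py label_toks cand_toks (best_token_pair_score_py label_toks cand_toks)

-- ===== LEMMAS AND PROOFS =====

-- the net effect of A's inner-loop body on `best` is `max best (pvScore lt ct)`
def pvScore (lt ct : String) : Int :=
  if lt = ct then 10
  else
    let p := pvCommonPrefixLen lt.toList ct.toList
    max (if p ≥ 3 then 6 else if p ≥ 2 then 3 else 0)
        (if (PySem.Chars.isIn lt.toList ct.toList || PySem.Chars.isIn ct.toList lt.toList) && decide (p > 0)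
         then 2 else 0)

theorem pvStep_eq (lt ct : String) (b : Int) (hb : 0 ≤ b) :
    (if lt = ct then max b 10
     else
       let p := pvCommonPrefixLen lt.toList ct.toList
       let best1 := if p ≥ 3 then max b 6 else if p ≥ 2 then max b 3 else b
       if (PySem.Chars.isIn lt.toList ct.toList || PySem.Chars.isIn ct.toList lt.toList) && decide (p > 0)
       then max best1 2 else best1) = max b (pvScore lt ct) := by
  unfold pvScore
  dsimp only
  split_ifs <;> omega

theorem pvInner_eq_foldMax (lt : String) (cts : List String) (b : Int) (hb : 0 ≤ b) :
    cts.foldl (fun best ct =>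
      if lt = ct then max best 10
      else
        let p := pvCommonPrefixLen lt.toList ct.toList
        let best1 := if p ≥ 3 then max best 6 else if p ≥ 2 then max best 3 else best
        if (PySem.Chars.isIn lt.toList ct.toList || PySem.Chars.isIn ct.toList lt.toList) && decide (p > 0)
        then max best1 2 else best1) b
    = cts.foldl (fun best ct => max best (pvScore lt ct)) b := by
  induction cts generalizing b with
  | nil => rfl
  | cons c cs ih =>
      simp only [List.foldl_cons]
      rw [pvStep_eq lt c b hb, ih _ (le_trans hb (le_max_left _ _))]

theorem pvCpl_ge_iff (a b : List Char) (n : Nat) :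
    (n : Int) ≤ pvCommonPrefixLen a b ↔ n ≤ a.length ∧ n ≤ b.length ∧ a.take n = b.take n := by
  induction a generalizing b n with
  | nil =>
      cases n <;> simp [pvCommonPrefixLen] <;> omega
  | cons ca as_ ih =>
      cases b with
      | nil => cases n <;> simp [pvCommonPrefixLen] <;> omega
      | cons cb bs =>
          cases n with
          | zero =>
              have h0 : (0:Int) ≤ pvCommonPrefixLen (ca :: as_) (cb :: bs) := by
                by_cases h : ca = cb
                · have := (ih bs 0).mpr (by simp)
                  simp [pvCommonPrefixLen, h]; omega
                · simp [pvCommonPrefixLen, h]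
              simpa using h0
          | succ m =>
              by_cases h : ca = cb
              · subst h
                have hih := ih bs m
                simp only [pvCommonPrefixLen, if_pos rfl, List.length_cons, List.take_succ_cons,
                  List.cons.injEq, true_and]
                push_cast at hih ⊢
                constructor
                · intro hle
                  have := hih.mp (by omega)
                  refine ⟨by omega, by omega, this.2.2⟩
                · rintro ⟨h1, h2, h3⟩
                  have := hih.mpr ⟨by omega, by omega, h3⟩
                  omega
              · simp only [pvCommonPrefixLen, if_neg h, List.take_succ_cons, List.cons.injEq]
                constructor
                · intro hle; exfalso; omega
                · rintro ⟨_, _, h3, _⟩; exact absurd h3 h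
theorem pvCpl_pos_iff (a b : List Char) :
    0 < pvCommonPrefixLen a b ↔ a ≠ [] ∧ b ≠ [] ∧ a.head? = b.head? := by
  have h := pvCpl_ge_iff a b 1
  push_cast at h
  rw [show (0 : Int) < pvCommonPrefixLen a b ↔ (1 : Int) ≤ pvCommonPrefixLen a b by omega, h]
  cases a <;> cases b <;> simp

theorem pvScore_le_six (lt ct : String) (h : lt ≠ ct) : pvScore lt ct ≤ 6 := by
  unfold pvScore; dsimp only; split_ifs <;> first | exact absurd ‹lt = ct› h | omega

theorem pvScore_le_three (lt ct : String) (h : lt ≠ ct)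
    (h3 : ¬ (3:Int) ≤ pvCommonPrefixLen lt.toList ct.toList) : pvScore lt ct ≤ 3 := by
  unfold pvScore; dsimp only; split_ifs <;> first | exact absurd ‹lt = ct› h | omega

theorem pvScore_le_two (lt ct : String) (h : lt ≠ ct)
    (h2 : ¬ (2:Int) ≤ pvCommonPrefixLen lt.toList ct.toList) : pvScore lt ct ≤ 2 := by
  unfold pvScore; dsimp only; split_ifs <;> first | exact absurd ‹lt = ct› h | omega

theorem pvScore_le_zero (lt ct : String) (h : lt ≠ ct)
    (h2 : ¬ (2:Int) ≤ pvCommonPrefixLen lt.toList ct.toList)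
    (hs : ¬ ((PySem.Chars.isIn lt.toList ct.toList || PySem.Chars.isIn ct.toList lt.toList) = true
             ∧ 0 < pvCommonPrefixLen lt.toList ct.toList)) : pvScore lt ct ≤ 0 := by
  unfold pvScore; dsimp only
  split_ifs with hA hB hC hD <;> first | exact absurd ‹lt = ct› h | omega | skip
  all_goals (exfalso; simp only [Bool.and_eq_true, decide_eq_true_eq] at *) <;> tauto
theorem pvSix_le_score (lt ct : String) (h : lt ≠ ct)
    (h3 : (3:Int) ≤ pvCommonPrefixLen lt.toList ct.toList) : 6 ≤ pvScore lt ct := by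
  unfold pvScore; dsimp only; split_ifs <;> first | exact absurd ‹lt = ct› h | omega

theorem pvThree_le_score (lt ct : String) (h : lt ≠ ct)
    (h2 : (2:Int) ≤ pvCommonPrefixLen lt.toList ct.toList) : 3 ≤ pvScore lt ct := by
  unfold pvScore; dsimp only; split_ifs <;> first | exact absurd ‹lt = ct› h | omega

theorem pvTwo_le_score (lt ct : String) (h : lt ≠ ct)
    (hi : (PySem.Chars.isIn lt.toList ct.toList || PySem.Chars.isIn ct.toList lt.toList) = true)
    (hp : 0 < pvCommonPrefixLen lt.toList ct.toList) : 2 ≤ pvScore lt ct := by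
  unfold pvScore; dsimp only
  split_ifs with hA hB hC hD hE hF hG
  all_goals try exact absurd ‹lt = ct› h
  all_goals try omega
  all_goals (exfalso; simp_all)
theorem pvFoldMax_init_le (lt : String) (cts : List String) (b : Int) :
    b ≤ cts.foldl (fun best ct => max best (pvScore lt ct)) b := by
  induction cts generalizing b with
  | nil => simp
  | cons c cs ih => exact le_trans (le_max_left _ _) (ih _)

theorem pvFoldMax_ge (lt : String) (cts : List String) (b : Int) (c : String) (hc : c ∈ cts) :
    pvScore lt c ≤ cts.foldl (fun best ct => max best (pvScore lt ct)) b := by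
  induction cts generalizing b with
  | nil => cases hc
  | cons d ds ih =>
      rcases List.mem_cons.mp hc with h | h
      · subst h; exact le_trans (le_max_right _ _) (pvFoldMax_init_le lt ds _)
      · simp only [List.foldl_cons]; exact ih _ h

theorem pvFoldMax_le (lt : String) (cts : List String) (b v : Int) (hb : b ≤ v)
    (h : ∀ c ∈ cts, pvScore lt c ≤ v) :
    cts.foldl (fun best ct => max best (pvScore lt ct)) b ≤ v := by
  induction cts generalizing b with
  | nil => simpa using hb
  | cons c cs ih =>
      simp only [List.foldl_cons]
      apply ih
      · exact max_le hb (h c List.mem_cons_self)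
      · exact fun d hd => h d (List.mem_cons_of_mem _ hd)

theorem pvScore_self (lt : String) : pvScore lt lt = 10 := by simp [pvScore]

theorem pvScore_le_ten (lt ct : String) : pvScore lt ct ≤ 10 := by
  unfold pvScore; dsimp only; split_ifs <;> omega

theorem pvBest_eq_tier (lt : String) (cts : List String) :
    cts.foldl (fun best ct => max best (pvScore lt ct)) 0 =
    (if PySem.Set.contains (PySem.Set.ofList cts) lt then 10
     else if decide (3 ≤ lt.toList.length) && PySem.Set.contains
            (PySem.Set.ofList ((cts.filter (fun ct => 3 ≤ ct.toList.length)).map (fun ct => ct.toList.take 3)))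
            (lt.toList.take 3) then 6
     else if decide (2 ≤ lt.toList.length) && PySem.Set.contains
            (PySem.Set.ofList ((cts.filter (fun ct => 2 ≤ ct.toList.length)).map (fun ct => ct.toList.take 2)))
            (lt.toList.take 2) then 3
     else if !lt.toList.isEmpty &&
            cts.any (fun ct =>
              !ct.toList.isEmpty && ct.toList.head? == lt.toList.head? &&
              (PySem.Chars.isIn lt.toList ct.toList || PySem.Chars.isIn ct.toList lt.toList))
         then 2
     else 0) := by
  have hc1 : PySem.Set.contains (PySem.Set.ofList cts) lt = true ↔ lt ∈ cts := by
    rw [PySem.Set.contains_iff, PySem.Set.mem_ofList]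
  have hc3 : (decide (3 ≤ lt.toList.length) && PySem.Set.contains
      (PySem.Set.ofList ((cts.filter (fun ct => 3 ≤ ct.toList.length)).map (fun ct => ct.toList.take 3)))
      (lt.toList.take 3)) = true ↔
      (3 ≤ lt.toList.length ∧ lt.toList.take 3 ∈
        (cts.filter (fun ct => 3 ≤ ct.toList.length)).map (fun ct => ct.toList.take 3)) := by
    rw [Bool.and_eq_true, decide_eq_true_eq, PySem.Set.contains_iff, PySem.Set.mem_ofList]
  have hc2 : (decide (2 ≤ lt.toList.length) && PySem.Set.contains
      (PySem.Set.ofList ((cts.filter (fun ct => 2 ≤ ct.toList.length)).map (fun ct => ct.toList.take 2)))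
      (lt.toList.take 2)) = true ↔
      (2 ≤ lt.toList.length ∧ lt.toList.take 2 ∈
        (cts.filter (fun ct => 2 ≤ ct.toList.length)).map (fun ct => ct.toList.take 2)) := by
    rw [Bool.and_eq_true, decide_eq_true_eq, PySem.Set.contains_iff, PySem.Set.mem_ofList]
  have hcs : (!lt.toList.isEmpty &&
      cts.any (fun ct =>
        !ct.toList.isEmpty && ct.toList.head? == lt.toList.head? &&
        (PySem.Chars.isIn lt.toList ct.toList || PySem.Chars.isIn ct.toList lt.toList))) = true ↔
      (lt.toList ≠ [] ∧ ∃ c ∈ cts, c.toList ≠ [] ∧ c.toList.head? = lt.toList.head? ∧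
        (PySem.Chars.isIn lt.toList c.toList || PySem.Chars.isIn c.toList lt.toList) = true) := by
    simp [List.any_eq_true, and_assoc]
  by_cases hmem : lt ∈ cts
  · rw [if_pos (hc1.mpr hmem)]
    exact le_antisymm (pvFoldMax_le lt cts 0 10 (by norm_num) (fun c _ => pvScore_le_ten lt c))
      (pvScore_self lt ▸ pvFoldMax_ge lt cts 0 lt hmem)
  · rw [if_neg (fun hc => hmem (hc1.mp hc))]
    have hne : ∀ c ∈ cts, lt ≠ c := fun c hc he => hmem (he ▸ hc)
    by_cases h3 : 3 ≤ lt.toList.length ∧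
        lt.toList.take 3 ∈ (cts.filter (fun ct => 3 ≤ ct.toList.length)).map (fun ct => ct.toList.take 3)
    · rw [if_pos (hc3.mpr h3)]
      obtain ⟨hl3, hmem3⟩ := h3
      obtain ⟨c, hcf, hceq⟩ := List.mem_map.mp hmem3
      obtain ⟨hcmem, hclen⟩ := List.mem_filter.mp hcf
      simp only [decide_eq_true_eq] at hclen
      have hcpl : (3:Int) ≤ pvCommonPrefixLen lt.toList c.toList :=
        (pvCpl_ge_iff lt.toList c.toList 3).mpr ⟨hl3, hclen, hceq.symm⟩
      exact le_antisymm
        (pvFoldMax_le lt cts 0 6 (by norm_num) (fun d hd => pvScore_le_six lt d (hne d hd)))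
        (le_trans (pvSix_le_score lt c (hne c hcmem) hcpl) (pvFoldMax_ge lt cts 0 c hcmem))
    · rw [if_neg (fun hc => h3 (hc3.mp hc))]
      have hno3 : ∀ c ∈ cts, ¬ (3:Int) ≤ pvCommonPrefixLen lt.toList c.toList := by
        intro c hc hcpl
        obtain ⟨h1, h2', heq⟩ := (pvCpl_ge_iff lt.toList c.toList 3).mp hcpl
        exact h3 ⟨h1, List.mem_map.mpr ⟨c, List.mem_filter.mpr ⟨hc, by simpa using h2'⟩, heq.symm⟩⟩
      by_cases h2 : 2 ≤ lt.toList.length ∧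
          lt.toList.take 2 ∈ (cts.filter (fun ct => 2 ≤ ct.toList.length)).map (fun ct => ct.toList.take 2)
      · rw [if_pos (hc2.mpr h2)]
        obtain ⟨hl2, hmem2⟩ := h2
        obtain ⟨c, hcf, hceq⟩ := List.mem_map.mp hmem2
        obtain ⟨hcmem, hclen⟩ := List.mem_filter.mp hcf
        simp only [decide_eq_true_eq] at hclen
        have hcpl : (2:Int) ≤ pvCommonPrefixLen lt.toList c.toList :=
          (pvCpl_ge_iff lt.toList c.toList 2).mpr ⟨hl2, hclen, hceq.symm⟩
        exact le_antisymm
          (pvFoldMax_le lt cts 0 3 (by norm_num)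
            (fun d hd => pvScore_le_three lt d (hne d hd) (hno3 d hd)))
          (le_trans (pvThree_le_score lt c (hne c hcmem) hcpl) (pvFoldMax_ge lt cts 0 c hcmem))
      · rw [if_neg (fun hc => h2 (hc2.mp hc))]
        have hno2 : ∀ c ∈ cts, ¬ (2:Int) ≤ pvCommonPrefixLen lt.toList c.toList := by
          intro c hc hcpl
          obtain ⟨h1, h2', heq⟩ := (pvCpl_ge_iff lt.toList c.toList 2).mp hcpl
          exact h2 ⟨h1, List.mem_map.mpr ⟨c, List.mem_filter.mpr ⟨hc, by simpa using h2'⟩, heq.symm⟩⟩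
        by_cases hscan : lt.toList ≠ [] ∧ ∃ c ∈ cts, c.toList ≠ [] ∧ c.toList.head? = lt.toList.head? ∧
            (PySem.Chars.isIn lt.toList c.toList || PySem.Chars.isIn c.toList lt.toList) = true
        · rw [if_pos (hcs.mpr hscan)]
          obtain ⟨hlne, c, hcmem, hcne, hhead, hisin⟩ := hscan
          have hp : 0 < pvCommonPrefixLen lt.toList c.toList :=
            (pvCpl_pos_iff lt.toList c.toList).mpr ⟨hlne, hcne, hhead.symm⟩
          exact le_antisymm
            (pvFoldMax_le lt cts 0 2 (by norm_num)
              (fun d hd => pvScore_le_two lt d (hne d hd) (hno2 d hd)))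
            (le_trans (pvTwo_le_score lt c (hne c hcmem) hisin hp) (pvFoldMax_ge lt cts 0 c hcmem))
        · rw [if_neg (fun hc => hscan (hcs.mp hc))]
          refine le_antisymm (pvFoldMax_le lt cts 0 0 le_rfl ?_) (pvFoldMax_init_le lt cts 0)
          intro c hc
          refine pvScore_le_zero lt c (hne c hc) (hno2 c hc) ?_
          rintro ⟨hi, hp⟩
          obtain ⟨hlne, hcne, hhd⟩ := (pvCpl_pos_iff lt.toList c.toList).mp hp
          exact hscan ⟨hlne, c, hc, hcne, hhd.symm, hi⟩

theorem pvStep_outer (cand_toks : List String) (lt : String) (t : Int) :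
    (t + cand_toks.foldl (fun best ct =>
      if lt = ct then max best 10
      else
        let p := pvCommonPrefixLen lt.toList ct.toList
        let best1 := if p ≥ 3 then max best 6 else if p ≥ 2 then max best 3 else best
        if (PySem.Chars.isIn lt.toList ct.toList || PySem.Chars.isIn ct.toList lt.toList) && decide (p > 0)
        then max best1 2 else best1) 0) =
    (if PySem.Set.contains (PySem.Set.ofList cand_toks) lt then t + 10
     else if decide (3 ≤ lt.toList.length) && PySem.Set.contains
            (PySem.Set.ofList ((cand_toks.filter (fun ct => 3 ≤ ct.toList.length)).map (fun ct => ct.toList.take 3)))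
            (lt.toList.take 3) then t + 6
     else if decide (2 ≤ lt.toList.length) && PySem.Set.contains
            (PySem.Set.ofList ((cand_toks.filter (fun ct => 2 ≤ ct.toList.length)).map (fun ct => ct.toList.take 2)))
            (lt.toList.take 2) then t + 3
     else if !lt.toList.isEmpty &&
            cand_toks.any (fun ct =>
              !ct.toList.isEmpty && ct.toList.head? == lt.toList.head? &&
              (PySem.Chars.isIn lt.toList ct.toList || PySem.Chars.isIn ct.toList lt.toList))
         then t + 2
     else t) := by
  rw [pvInner_eq_foldMax lt cand_toks 0 le_rfl, pvBest_eq_tier lt cand_toks]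
  split_ifs <;> omega

-- ===== VERDICT (by name: the statement is the Claim_ definition above) =====
theorem best_token_pair_score_py_spec : Claim_equal_best_token_pair_score_py := by
  intro label_toks cand_toks hdom
  clear hdom
  unfold Spec_best_token_pair_score_py best_token_pair_score_py best_token_pair_score_py_alt
  dsimp only
  induction label_toks using List.reverseRecOn with
  | nil => rfl
  | append_singleton ls l ih =>
      rw [List.foldl_append, List.foldl_append, ih]
      simp only [List.foldl_cons, List.foldl_nil]
      exact pvStep_outer cand_toks l _
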